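-- pv_equiv track=rewrite | github.com/ElijahBeard/CS4040-HW4 | rod.py | sparse_rod_cutting
-- ===== SOURCE A (Python) =====
-- def sparse_rod_cutting(n, prices):
--     r = [0] * (n + 1)
--
--     for j in range(1, n + 1):
--         q = float('-inf')
--         for i in range(1, j + 1):
--             price = prices.get(i, 0)
--             q = max(q, price + r[j - i])
--         r[j] = q
--
--     return r[n]
-- ===== SOURCE B (Python) =====
-- def sparse_rod_cutting(n, prices):
--     # Forward ("push") dynamic programming: instead of pulling the best value
--     # for each length j from all shorter lengths, finalize lengths in
--     # increasing order and push best[j] + price(i) forward into length j + i.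
--     best = [0] + [prices.get(i, 0) for i in range(1, n + 1)]
--     for j in range(1, n + 1):
--         for i in range(1, n - j + 1):
--             v = best[j] + prices.get(i, 0)
--             if v > best[j + i]:
--                 best[j + i] = v
--     return best[n]
-- ===== Notes on version B (the rewrite author's own statement) =====
-- stated objective: alternative
-- what changed: Replaces A's backward (pull) rod-cutting DP, which for each length j scans all shorter lengths for the best last cut, by a forward (push) DP that finalizes lengths in increasing order and pushes best[j]+price(i) into best[j+i], with the table initialized to the single-piece prices.
import Mathlib
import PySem

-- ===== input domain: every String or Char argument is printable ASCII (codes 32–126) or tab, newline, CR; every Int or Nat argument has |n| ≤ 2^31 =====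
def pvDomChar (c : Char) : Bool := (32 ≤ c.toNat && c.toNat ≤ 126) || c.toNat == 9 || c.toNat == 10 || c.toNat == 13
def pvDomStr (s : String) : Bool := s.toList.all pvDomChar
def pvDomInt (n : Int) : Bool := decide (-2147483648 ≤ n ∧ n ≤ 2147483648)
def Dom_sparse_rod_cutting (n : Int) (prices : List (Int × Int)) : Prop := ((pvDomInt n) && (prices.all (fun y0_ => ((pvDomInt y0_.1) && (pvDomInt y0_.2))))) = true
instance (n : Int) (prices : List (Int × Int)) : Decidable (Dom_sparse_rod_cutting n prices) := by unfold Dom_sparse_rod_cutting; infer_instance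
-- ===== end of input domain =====

-- B replaces A's backward ("pull") rod-cutting DP by a forward ("push") DP over the same
-- recurrence: same O(n^2) cost, genuinely different traversal (objective: alternative).

-- prices.get(i, 0): dict → association list, lookup = first match, default 0
def dictGet (prices : List (Int × Int)) (i : Int) : Int :=
  ((prices.find? (fun kv => kv.1 == i)).map Prod.snd).getD 0

-- q = max(q, v) where q starts as float('-inf'): none models -inf
def omax (q : Option Int) (v : Int) : Option Int :=
  some (match q with | none => v | some a => max a v)

-- ===== PORT A =====
def sparse_rod_cutting (n : Int) (prices : List (Int × Int)) : Int :=
  -- r = [0] * (n + 1)   ([0]*k is [] for k ≤ 0, as .toNat clamps)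
  let r0 : List Int := List.replicate (n + 1).toNat 0
  let r := (PySem.List.pyRange 1 (n + 1) 1).foldl (fun r j =>
    -- q = float('-inf'); for i in range(1, j+1): q = max(q, prices.get(i,0) + r[j-i])
    let q : Option Int := (PySem.List.pyRange 1 (j + 1) 1).foldl
      (fun q i => omax q (dictGet prices i + PySem.List.pyGetD r (j - i) 0)) none
    -- r[j] = q  (the inner range is nonempty for every j the outer range yields, so q is
    -- `some` there and `.getD 0` is never the default)
    PySem.List.pySetD r j (q.getD 0)) r0
  -- return r[n]  (in range for n ≥ 0, i.e. under Pre_)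
  PySem.List.pyGetD r n 0

-- ===== PORT B =====
def sparse_rod_cutting_alt (n : Int) (prices : List (Int × Int)) : Int :=
  -- best = [0] + [prices.get(i, 0) for i in range(1, n + 1)]
  let best0 : List Int := 0 :: (PySem.List.pyRange 1 (n + 1) 1).map (fun i => dictGet prices i)
  -- for j in range(1, n+1): for i in range(1, n-j+1): push best[j] + prices.get(i,0) into best[j+i]
  let best := (PySem.List.pyRange 1 (n + 1) 1).foldl (fun best j =>
    (PySem.List.pyRange 1 (n - j + 1) 1).foldl (fun best i =>
      let v := PySem.List.pyGetD best j 0 + dictGet prices i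
      if v > PySem.List.pyGetD best (j + i) 0 then PySem.List.pySetD best (j + i) v
      else best) best) best0
  -- return best[n]  (in range for n ≥ 0, i.e. under Pre_)
  PySem.List.pyGetD best n 0

-- ===== PRECONDITION & SPEC =====
-- Pre_ excludes exactly the inputs on which A raises: for n < 0 the table r = [0]*(n+1)
-- is empty (or too short) and r[n] raises IndexError.
def Pre_sparse_rod_cutting (n : Int) (prices : List (Int × Int)) : Prop := 0 ≤ n
instance (n : Int) (prices : List (Int × Int)) : Decidable (Pre_sparse_rod_cutting n prices) := by
  unfold Pre_sparse_rod_cutting; infer_instance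

def pvWitness_sparse_rod_cutting : Int × (List (Int × Int)) := (4, [(1, 1), (2, 5), (3, 8)])

def Spec_sparse_rod_cutting (n : Int) (prices : List (Int × Int)) (out : Int) : Prop := out = sparse_rod_cutting_alt n prices
instance (n : Int) (prices : List (Int × Int)) (out : Int) : Decidable (Spec_sparse_rod_cutting n prices out) := by unfold Spec_sparse_rod_cutting; infer_instance

-- ===== CLAIM (what is proved, stated in full; the proofs are below) =====
def Claim_equal_sparse_rod_cutting : Prop := ∀ (n : Int) (prices : List (Int × Int)), Dom_sparse_rod_cutting n prices → Pre_sparse_rod_cutting n prices → Spec_sparse_rod_cutting n prices (sparse_rod_cutting n prices)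

-- ===== LEMMAS AND PROOFS =====

-- max of a list, none for the empty list (A's float('-inf') accumulator)
def lmax (xs : List Int) : Option Int := xs.foldl omax none

-- canonical DP table: dpList p m = [F 0, …, F m], the new entry written in A's inner order
def dpList (p : Int → Int) : Nat → List Int
  | 0 => [0]
  | m + 1 =>
    let L := dpList p m
    L ++ [(lmax ((List.range (m + 1)).map
        (fun (k : Nat) => p ((1 : Int) + (k : Int)) + L.getD (m - k) 0))).getD 0]

-- the optimal revenue for a rod of length t
def F (p : Int → Int) (t : Nat) : Int := (dpList p t).getD t 0

-- running maximum of g over 0..m (B's push accumulation order)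
def rmax (g : Nat → Int) : Nat → Int
  | 0 => g 0
  | m + 1 => max (rmax g m) (g (m + 1))

theorem length_dpList (p : Int → Int) (m : Nat) : (dpList p m).length = m + 1 := by
  induction m with
  | zero => rfl
  | succ m ih => simp [dpList, ih]

theorem dpList_getD_stable (p : Int → Int) (M t : Nat) (h : t ≤ M) :
    (dpList p M).getD t 0 = F p t := by
  induction M with
  | zero => interval_cases t; rfl
  | succ M ih =>
    rcases Nat.lt_or_ge t (M + 1) with hlt | hge
    · rw [dpList, List.getD_append _ _ _ _ (by rw [length_dpList]; omega)]
      exact ih (by omega)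
    · have : t = M + 1 := by omega
      subst this; rfl

theorem lmax_append (xs ys : List Int) : lmax (xs ++ ys) = ys.foldl omax (lmax xs) := by
  simp [lmax, List.foldl_append]

theorem lmax_map_range_succ (g : Nat → Int) (m : Nat) :
    lmax ((List.range (m + 1)).map g) = some (rmax g m) := by
  induction m with
  | zero => rfl
  | succ m ih =>
    rw [List.range_succ, List.map_append, lmax_append, ih]
    simp [rmax, omax]

theorem map_range_reflect (g : Nat → Int) (m : Nat) :
    (List.range (m + 1)).map (fun k => g (m - k)) = ((List.range (m + 1)).map g).reverse := by
  rw [← List.map_reverse, List.range_eq_range', List.reverse_range']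
  simp [List.map_map, ← List.range_eq_range']

theorem lmax_reverse (xs : List Int) : lmax xs.reverse = lmax xs := by
  haveI : RightCommutative omax := ⟨by
    intro q a b
    cases q with
    | none => simp only [omax]; rw [max_comm]
    | some x => simp only [omax]; rw [max_right_comm]⟩
  exact List.Perm.foldl_eq (List.reverse_perm xs) none

-- the DP recurrence in B's order: F (m+1) = max over j' ∈ [0..m] of F j' + p (m+1-j')
theorem F_succ (p : Int → Int) (m : Nat) :
    F p (m + 1) = rmax (fun j' => F p j' + p (((m : Int) + 1) - (j' : Int))) m := by
  have hbody : (List.range (m + 1)).map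
      (fun (k : Nat) => p ((1 : Int) + (k : Int)) + (dpList p m).getD (m - k) 0)
      = ((List.range (m + 1)).map
          (fun j' => F p j' + p (((m : Int) + 1) - (j' : Int)))).reverse := by
    rw [← map_range_reflect]
    apply List.map_congr_left
    intro k hk
    rw [List.mem_range] at hk
    rw [dpList_getD_stable p m (m - k) (by omega)]
    have h1 : ((1 : Int) + (k : Int)) = ((m : Int) + 1 - ((m - k : Nat) : Int)) := by
      have : ((m - k : Nat) : Int) = (m : Int) - k := by omega
      omega
    rw [h1, add_comm]
  have : F p (m + 1) = (lmax ((List.range (m + 1)).map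
      (fun (k : Nat) => p ((1 : Int) + (k : Int)) + (dpList p m).getD (m - k) 0))).getD 0 := by
    show (dpList p (m+1)).getD (m+1) 0 = _
    rw [dpList]
    rw [List.getD_append_right _ _ 0 (m+1) (by rw [length_dpList]), length_dpList]
    simp
  rw [this, hbody, lmax_reverse, lmax_map_range_succ]
  rfl

-- ===== A-side: the pull DP builds dpList left to right =====

theorem foldA_inv (prices : List (Int × Int)) (N : Nat) (m : Nat) (hm : m ≤ N) :
    ((List.range m).map (fun (k : Nat) => (1:Int) + (k:Int))).foldl
      (fun r j => PySem.List.pySetD r j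
        (((PySem.List.pyRange 1 (j+1) 1).foldl
           (fun q i => omax q (dictGet prices i + PySem.List.pyGetD r (j - i) 0)) none).getD 0))
      (List.replicate (N+1) 0)
    = dpList (dictGet prices) m ++ List.replicate (N - m) 0 := by
  set p := dictGet prices with hp
  induction m with
  | zero => simp [dpList, List.replicate_succ]
  | succ m ih =>
    rw [List.range_succ, List.map_append, List.foldl_append, ih (by omega)]
    set L := dpList p m with hL
    set S := L ++ List.replicate (N - m) 0 with hS
    simp only [List.map_cons, List.map_nil, List.foldl_cons, List.foldl_nil]
    -- inner range: range(1, (1+m)+1) = [1, …, 1+m]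
    have hr : PySem.List.pyRange 1 ((1 + (m:Int)) + 1) 1
        = (List.range (m+1)).map (fun (k : Nat) => (1:Int) + (k:Int)) := by
      have h2 : ((1:Int) + (m:Int) + 1 - 1).toNat = m + 1 := by omega
      rw [PySem.List.pyRange_one, h2]
    rw [hr, List.foldl_map]
    -- pointwise: reading r[j-i] = S[m-k] = L[m-k]
    have hread : ∀ (q : Option Int) (k : Nat), k ∈ List.range (m+1) →
        omax q (p ((1:Int)+(k:Int)) + PySem.List.pyGetD S ((1+(m:Int)) - ((1:Int)+(k:Int))) 0)
        = omax q (p ((1:Int)+(k:Int)) + L.getD (m - k) 0) := by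
      intro q k hk
      rw [List.mem_range] at hk
      have h1 : (1+(m:Int)) - ((1:Int)+(k:Int)) = ((m - k : Nat) : Int) := by omega
      rw [h1, PySem.List.pyGetD_natCast, hS,
        List.getD_append _ _ _ _ (by rw [hL, length_dpList]; omega)]
    have hinner : (List.range (m+1)).foldl
        (fun (q : Option Int) (k : Nat) => omax q (p ((1:Int)+(k:Int)) + PySem.List.pyGetD S ((1+(m:Int)) - ((1:Int)+(k:Int))) 0)) none
        = lmax ((List.range (m+1)).map (fun (k:Nat) => p ((1:Int)+(k:Int)) + L.getD (m - k) 0)) := by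
      rw [lmax, List.foldl_map]
      exact PySem.List.foldl_congr_mem _ _ _ _ hread
    rw [hinner]
    -- the write: r[1+m] = q
    have hw : (1 + (m:Int)) = ((m+1 : Nat) : Int) := by omega
    rw [hw, PySem.List.pySetD_natCast]
    rw [hS, List.set_append]
    have hlen : L.length = m + 1 := by rw [hL, length_dpList]
    rw [if_neg (by omega)]
    have hrep : N - m = (N - (m+1)) + 1 := by omega
    have hidx : m + 1 - L.length = 0 := by omega
    rw [hidx, hrep, List.replicate_succ, List.set_cons_zero]
    rw [show dpList p (m+1) = L ++ [(lmax ((List.range (m + 1)).map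
        (fun (k : Nat) => p ((1 : Int) + (k : Int)) + L.getD (m - k) 0))).getD 0] from rfl]
    simp

theorem portA_eq_F (n : Int) (prices : List (Int × Int)) (hn : 0 ≤ n) :
    sparse_rod_cutting n prices = F (dictGet prices) n.toNat := by
  obtain ⟨N, rfl⟩ : ∃ N : Nat, n = (N : Int) := ⟨n.toNat, (Int.toNat_of_nonneg hn).symm⟩
  show PySem.List.pyGetD _ (N : Int) 0 = _
  have houter : PySem.List.pyRange 1 ((N:Int) + 1) 1
      = (List.range N).map (fun (k : Nat) => (1:Int) + (k:Int)) := by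
    rw [PySem.List.pyRange_one]; norm_num
  have h0 : ((N:Int) + 1).toNat = N + 1 := by omega
  rw [houter, h0, foldA_inv prices N N (le_refl N)]
  simp [F, Int.toNat_natCast]

-- ===== B-side: the push DP maintains, for each target, the best push seen so far =====

-- best value for a rod of length t after sources 1..j have pushed (source 0 = the init row)
def bub (p : Int → Int) (j t : Nat) : Int :=
  match t with
  | 0 => 0
  | t' + 1 => rmax (fun j' => F p j' + p (((t' : Int) + 1) - (j' : Int))) (min j t')

-- B's inner-loop body at source j
def stepB (p : Int → Int) (j : Int) (best : List Int) (i : Int) : List Int :=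
  if PySem.List.pyGetD best j 0 + p i > PySem.List.pyGetD best (j + i) 0
  then PySem.List.pySetD best (j + i) (PySem.List.pyGetD best j 0 + p i)
  else best

theorem foldB_len (p : Int → Int) (J c : Nat) (S : List Int) :
    ((((List.range c).map (fun (k : Nat) => (1:Int)+(k:Int))).foldl (stepB p (J:Int)) S)).length
      = S.length := by
  induction c generalizing S with
  | zero => rfl
  | succ c ih =>
    rw [List.range_succ, List.map_append, List.foldl_append]
    simp only [List.map_cons, List.map_nil, List.foldl_cons, List.foldl_nil]
    rw [stepB]
    split
    · rw [PySem.List.length_pySetD, ih]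
    · rw [ih]

theorem foldB_getD (p : Int → Int) (J c : Nat) (S : List Int) (hlen : J + c < S.length)
    (t : Nat) :
    ((((List.range c).map (fun (k : Nat) => (1:Int)+(k:Int))).foldl (stepB p (J:Int)) S)).getD t 0
      = if J + 1 ≤ t ∧ t ≤ J + c
        then max (S.getD t 0) (S.getD J 0 + p ((t:Int) - (J:Int)))
        else S.getD t 0 := by
  induction c generalizing t with
  | zero => simp only [List.range_zero, List.map_nil, List.foldl_nil]; rw [if_neg (by omega)]
  | succ c ih =>
    rw [List.range_succ, List.map_append, List.foldl_append]
    simp only [List.map_cons, List.map_nil, List.foldl_cons, List.foldl_nil]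
    set S' := (((List.range c).map (fun (k : Nat) => (1:Int)+(k:Int))).foldl (stepB p (J:Int)) S) with hS'
    have hlen' : S'.length = S.length := foldB_len p J c S
    have hreadJ : PySem.List.pyGetD S' (J:Int) 0 = S.getD J 0 := by
      rw [PySem.List.pyGetD_natCast, ih (by omega) J, if_neg (by omega)]
    have hpos : (J:Int) + ((1:Int)+(c:Int)) = ((J + 1 + c : Nat) : Int) := by omega
    have hreadT : PySem.List.pyGetD S' ((J:Int) + ((1:Int)+(c:Int))) 0 = S.getD (J+1+c) 0 := by
      rw [hpos, PySem.List.pyGetD_natCast, ih (by omega) (J+1+c), if_neg (by omega)]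
    rw [stepB, hreadJ, hreadT, hpos, PySem.List.pySetD_natCast]
    have hparg : ((1:Int)+(c:Int)) = ((J+1+c : Nat) : Int) - (J : Int) := by omega
    by_cases hc : t = J + 1 + c
    · subst hc
      have hcond : J + 1 ≤ J + 1 + c ∧ J + 1 + c ≤ J + (c+1) := ⟨by omega, by omega⟩
      rw [if_pos hcond, ← hparg]
      by_cases hgt : S.getD J 0 + p ((1:Int)+(c:Int)) > S.getD (J+1+c) 0
      · rw [if_pos hgt, List.getD_eq_getElem?_getD,
          List.getElem?_set_self (by omega : J+1+c < S'.length), Option.getD_some]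
        exact (max_eq_right (le_of_lt hgt)).symm
      · rw [if_neg hgt, ih (by omega) (J+1+c), if_neg (by omega)]
        exact (max_eq_left (not_lt.mp hgt)).symm
    · have hrest : ∀ (l : List Int), (l.set (J+1+c) (S.getD J 0 + p ((1:Int)+(c:Int)))).getD t 0 = l.getD t 0 := by
        intro l
        rw [List.getD_eq_getElem?_getD, List.getElem?_set_ne (by omega), ← List.getD_eq_getElem?_getD]
      have hmain : (if S.getD J 0 + p ((1:Int)+(c:Int)) > S.getD (J+1+c) 0
          then S'.set (J+1+c) (S.getD J 0 + p ((1:Int)+(c:Int))) else S').getD t 0 = S'.getD t 0 := by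
        split
        · exact hrest S'
        · rfl
      rw [hmain, ih (by omega) t]
      by_cases hw : J + 1 ≤ t ∧ t ≤ J + c
      · rw [if_pos hw, if_pos ⟨hw.1, by omega⟩]
      · rw [if_neg hw, if_neg (by omega)]

theorem bub_self (p : Int → Int) (t : Nat) : bub p t t = F p t := by
  cases t with
  | zero => rfl
  | succ t' =>
    rw [bub, Nat.min_eq_right (by omega), F_succ]

theorem foldB_inv (prices : List (Int × Int)) (N m : Nat) (hm : m ≤ N) :
    (((List.range m).map (fun (k:Nat) => (1:Int)+(k:Int))).foldl
      (fun best j => (PySem.List.pyRange 1 ((N:Int) - j + 1) 1).foldl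
        (stepB (dictGet prices) j) best)
      (0 :: (List.range N).map (fun (k:Nat) => dictGet prices ((1:Int)+(k:Int))))).length = N + 1
    ∧ ∀ t, t ≤ N →
      (((List.range m).map (fun (k:Nat) => (1:Int)+(k:Int))).foldl
        (fun best j => (PySem.List.pyRange 1 ((N:Int) - j + 1) 1).foldl
          (stepB (dictGet prices) j) best)
        (0 :: (List.range N).map (fun (k:Nat) => dictGet prices ((1:Int)+(k:Int))))).getD t 0
      = bub (dictGet prices) m t := by
  set p := dictGet prices with hp
  induction m with
  | zero =>
    constructor
    · simp
    · intro t ht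
      simp only [List.range_zero, List.map_nil, List.foldl_nil]
      cases t with
      | zero => rfl
      | succ t' =>
        rw [List.getD_cons_succ, List.getD_eq_getElem?_getD, List.getElem?_map,
          List.getElem?_range (by omega), Option.map_some, Option.getD_some]
        rw [bub, Nat.min_eq_left (by omega), rmax]
        show p ((1:Int)+(t':Int)) = F p 0 + p (((t':Int) + 1) - ((0:Nat):Int))
        rw [show F p 0 = 0 from rfl]
        rw [show (((t':Int) + 1) - ((0:Nat):Int)) = (1:Int)+(t':Int) by omega]
        omega
  | succ m ih =>
    obtain ⟨ihlen, ihval⟩ := ih (by omega)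
    rw [List.range_succ, List.map_append, List.foldl_append]
    simp only [List.map_cons, List.map_nil, List.foldl_cons, List.foldl_nil]
    set R := (((List.range m).map (fun (k:Nat) => (1:Int)+(k:Int))).foldl
      (fun best j => (PySem.List.pyRange 1 ((N:Int) - j + 1) 1).foldl
        (stepB p j) best)
      (0 :: (List.range N).map (fun (k:Nat) => p ((1:Int)+(k:Int))))) with hR
    have h1 : (1:Int) + (m:Int) = ((m+1 : Nat) : Int) := by omega
    rw [h1]
    have hc : PySem.List.pyRange 1 ((N:Int) - ((m+1:Nat):Int) + 1) 1
        = (List.range (N - (m+1))).map (fun (k:Nat) => (1:Int)+(k:Int)) := by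
      rw [PySem.List.pyRange_one]
      rw [show ((N:Int) - ((m+1:Nat):Int) + 1 - 1).toNat = N - (m+1) by omega]
    rw [hc]
    have hlen : (m+1) + (N - (m+1)) < R.length := by rw [ihlen]; omega
    constructor
    · rw [foldB_len, ihlen]
    · intro t ht
      rw [foldB_getD p (m+1) (N - (m+1)) R hlen t]
      by_cases hw : m + 2 ≤ t
      · rw [if_pos ⟨by omega, by omega⟩, ihval t ht, ihval (m+1) (by omega)]
        -- t = t' + 1 with m + 1 ≤ t'
        obtain ⟨t', rfl⟩ : ∃ t', t = t' + 1 := ⟨t - 1, by omega⟩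
        have hmid : bub p m (m+1) = F p (m+1) := by
          rw [bub, Nat.min_self, ← F_succ]
        rw [hmid, bub, bub, Nat.min_eq_left (by omega : m+1 ≤ t'),
          Nat.min_eq_left (by omega : m ≤ t')]
        simp only [rmax]
        rw [show ((t' + 1 : Nat) : Int) = (t' : Int) + 1 by push_cast; ring]
      · rw [if_neg (by omega), ihval t ht]
        cases t with
        | zero => rfl
        | succ t' =>
          rw [bub, bub, Nat.min_eq_right (by omega), Nat.min_eq_right (by omega)]

theorem portB_eq_F (n : Int) (prices : List (Int × Int)) (hn : 0 ≤ n) :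
    sparse_rod_cutting_alt n prices = F (dictGet prices) n.toNat := by
  obtain ⟨N, rfl⟩ : ∃ N : Nat, n = (N : Int) := ⟨n.toNat, (Int.toNat_of_nonneg hn).symm⟩
  have hport : sparse_rod_cutting_alt (N:Int) prices
      = PySem.List.pyGetD
          ((PySem.List.pyRange 1 ((N:Int)+1) 1).foldl
            (fun best j => (PySem.List.pyRange 1 ((N:Int) - j + 1) 1).foldl
              (stepB (dictGet prices) j) best)
            (0 :: (PySem.List.pyRange 1 ((N:Int)+1) 1).map (fun i => dictGet prices i)))
          (N:Int) 0 := rfl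
  rw [hport]
  have houter : PySem.List.pyRange 1 ((N:Int) + 1) 1
      = (List.range N).map (fun (k:Nat) => (1:Int) + (k:Int)) := by
    rw [PySem.List.pyRange_one]; norm_num
  rw [houter, List.map_map]
  have hinit : (List.range N).map ((fun i => dictGet prices i) ∘ (fun (k:Nat) => (1:Int) + (k:Int)))
      = (List.range N).map (fun (k:Nat) => dictGet prices ((1:Int)+(k:Int))) := rfl
  rw [hinit]
  obtain ⟨hlen, hval⟩ := foldB_inv prices N N (le_refl N)
  rw [PySem.List.pyGetD_natCast, hval N (le_refl N), bub_self, Int.toNat_natCast]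

-- ===== VERDICT (by name: the statement is the Claim_ definition above) =====
theorem sparse_rod_cutting_spec : Claim_equal_sparse_rod_cutting := by
  intro n prices _ hpre
  unfold Spec_sparse_rod_cutting
  rw [portA_eq_F n prices hpre, portB_eq_F n prices hpre]
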